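-- pv_equiv track=rewrite | github.com/andrewyoung4/seo_pipeline_new | scripts/app/injectors/inject_competitor_parity_card.py | _apply_query_excludes
-- ===== SOURCE A (Python) =====
-- def _apply_query_excludes(rows, substrs):
--     if not substrs:
--         return rows
--     out = []
--     lowers = [s.lower() for s in substrs]
--     for r in rows:
--         ql = (r["query"] or "").lower()
--         if any(s in ql for s in lowers):
--             continue
--         out.append(r)
--     return out
-- ===== SOURCE B (Python) =====
-- def _apply_query_excludes(rows, substrs):
--     if not substrs:
--         return rows
--     keep = [(r, (r["query"] or "").lower()) for r in rows]
--     for s in substrs: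
--         sl = s.lower()
--         keep = [(r, ql) for (r, ql) in keep if sl not in ql]
--     return [r for (r, ql) in keep]
-- ===== Notes on version B (the rewrite author's own statement) =====
-- stated objective: alternative
-- what changed: B swaps the loop nesting: it lowers each row's query once into (row, lowered) pairs, then loops over the substrings, each pass filtering the surviving pairs, instead of A's per-row any()-scan over all substrings.
import Mathlib
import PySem

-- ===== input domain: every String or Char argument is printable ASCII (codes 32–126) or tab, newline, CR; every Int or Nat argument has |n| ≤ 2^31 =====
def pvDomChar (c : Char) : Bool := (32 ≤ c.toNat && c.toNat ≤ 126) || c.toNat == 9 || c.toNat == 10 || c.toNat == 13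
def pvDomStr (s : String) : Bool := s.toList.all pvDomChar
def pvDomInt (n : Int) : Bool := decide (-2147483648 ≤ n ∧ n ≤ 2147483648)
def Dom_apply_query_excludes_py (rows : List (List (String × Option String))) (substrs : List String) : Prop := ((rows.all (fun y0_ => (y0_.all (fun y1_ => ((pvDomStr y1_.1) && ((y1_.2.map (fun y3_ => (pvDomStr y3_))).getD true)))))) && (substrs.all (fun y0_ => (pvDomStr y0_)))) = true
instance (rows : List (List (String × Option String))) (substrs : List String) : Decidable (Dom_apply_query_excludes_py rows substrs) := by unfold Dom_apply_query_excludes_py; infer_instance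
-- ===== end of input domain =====

-- B swaps the loop nesting: lower each query once, then filter the surviving rows once per substring
-- (alternative decomposition, same worst-case cost). Equivalence is about the return value; neither side mutates.

-- (r["query"] or "").lower() — shared step of both Pythons (dict lookup = first match)
def pvQl (r : List (String × Option String)) : String :=
  PySem.Str.lower ((((PySem.Dict.mk r).get? "query").getD none).getD "")

-- ===== PORT A =====
def apply_query_excludes_py (rows : List (List (String × Option String))) (substrs : List String) : List (List (String × Option String)) :=
  if substrs.isEmpty then rows else
  let lowers := substrs.map PySem.Str.lower
  rows.foldl (fun out r =>
    let ql := pvQl r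
    if lowers.any (fun s => PySem.Str.isIn s ql) then out else out ++ [r]) []

-- ===== PORT B =====
def apply_query_excludes_py_alt (rows : List (List (String × Option String))) (substrs : List String) : List (List (String × Option String)) :=
  if substrs.isEmpty then rows else
  let keep0 := rows.map (fun r => (r, pvQl r))
  let keep := substrs.foldl
    (fun k s =>
      let sl := PySem.Str.lower s
      k.filter (fun p => !(PySem.Str.isIn sl p.2))) keep0
  keep.map Prod.fst

-- ===== PRECONDITION & SPEC =====
-- Pre_ excludes exactly the inputs where Python A raises KeyError: a nonempty substring list
-- together with some row that has no "query" key (B raises there too).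
def Pre_apply_query_excludes_py (rows : List (List (String × Option String))) (substrs : List String) : Prop :=
  substrs = [] ∨ ∀ r ∈ rows, r.any (fun p => p.1 == "query")
instance (rows : List (List (String × Option String))) (substrs : List String) : Decidable (Pre_apply_query_excludes_py rows substrs) := by unfold Pre_apply_query_excludes_py; infer_instance

def pvWitness_apply_query_excludes_py : (List (List (String × Option String))) × List String :=
  ([[("query", some "alpha beta")], [("query", none)]], ["BET"])

def Spec_apply_query_excludes_py (rows : List (List (String × Option String))) (substrs : List String) (out : List (List (String × Option String))) : Prop := out = apply_query_excludes_py_alt rows substrs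
instance (rows : List (List (String × Option String))) (substrs : List String) (out : List (List (String × Option String))) : Decidable (Spec_apply_query_excludes_py rows substrs out) := by unfold Spec_apply_query_excludes_py; infer_instance

-- ===== CLAIM (what is proved, stated in full; the proofs are below) =====
def Claim_equal_apply_query_excludes_py : Prop := ∀ (rows : List (List (String × Option String))) (substrs : List String), Dom_apply_query_excludes_py rows substrs → Pre_apply_query_excludes_py rows substrs → Spec_apply_query_excludes_py rows substrs (apply_query_excludes_py rows substrs)

-- ===== LEMMAS AND PROOFS =====

-- B's outer loop: repeated filtering = one filter by the conjunction
theorem pv_foldl_filter {α β : Type} (q : β → α → Bool) (ss : List β) (init : List α) :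
    ss.foldl (fun k s => k.filter (q s)) init = init.filter (fun x => ss.all (fun s => q s x)) := by
  induction ss generalizing init with
  | nil => simp
  | cons s t ih => simp [ih, List.filter_filter, Bool.and_comm]

theorem apply_query_excludes_py_spec : Claim_equal_apply_query_excludes_py := by
  intro rows substrs _ _
  unfold Spec_apply_query_excludes_py apply_query_excludes_py apply_query_excludes_py_alt
  by_cases h : substrs.isEmpty = true
  · rw [if_pos h, if_pos h]
  · rw [if_neg h, if_neg h]
    dsimp only
    rw [pv_foldl_filter]
    have hA : rows.foldl (fun out r =>
        if (substrs.map PySem.Str.lower).any (fun s => PySem.Str.isIn s (pvQl r)) then out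
        else out ++ [r]) [] =
        rows.filter (fun r => !((substrs.map PySem.Str.lower).any (fun s => PySem.Str.isIn s (pvQl r)))) := by
      have hfun : (fun (out : List (List (String × Option String))) r =>
          if (substrs.map PySem.Str.lower).any (fun s => PySem.Str.isIn s (pvQl r)) then out
          else out ++ [r]) =
          (fun out r =>
          if !((substrs.map PySem.Str.lower).any (fun s => PySem.Str.isIn s (pvQl r))) then out ++ [r]
          else out) := by
        funext out r
        cases hc : (substrs.map PySem.Str.lower).any (fun s => PySem.Str.isIn s (pvQl r)) <;>
          simp only [Bool.not_true, Bool.not_false, if_true, if_false, Bool.false_eq_true]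
      rw [hfun, PySem.List.foldl_append_if_eq_filter, List.nil_append]
    rw [hA, List.filter_map, List.map_map]
    simp only [Function.comp_def, List.map_id_fun', id]
    apply List.filter_congr
    intro r _
    rw [List.not_any_eq_all_not, List.all_map]
    rfl
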